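-- pv_equiv track=rewrite | github.com/adarshnamsani/exam | list_assgn.py | remove_adj_dup
-- ===== SOURCE A (Python) =====
-- def remove_adj_dup(l):
--     if l:
--         indices=[]
--         for i in range(0,len(l)-1,1):
--             if l[i] == l[i+1]:
--                 indices.append(i)
--         l=[i for j, i in enumerate(l) if j not in indices]
--         return l
--
--     return None
-- ===== SOURCE B (Python) =====
-- def remove_adj_dup(l):
--     if not l:
--         return None
--     out = []
--     n = len(l)
--     i = 0
--     while i < n:
--         j = i
--         while j + 1 < n and l[j + 1] == l[j]:
--             j += 1
--         out.append(l[j])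
--         i = j + 1
--     return out
-- ===== Notes on version B (the rewrite author's own statement) =====
-- stated objective: faster
-- what changed: Replaced A's index-collecting pass plus quadratic 'j not in indices' filter by a run-skipping two-pointer scan: an outer loop per maximal run of equal values whose inner scan finds the run's end and emits only that last element.
import Mathlib
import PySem

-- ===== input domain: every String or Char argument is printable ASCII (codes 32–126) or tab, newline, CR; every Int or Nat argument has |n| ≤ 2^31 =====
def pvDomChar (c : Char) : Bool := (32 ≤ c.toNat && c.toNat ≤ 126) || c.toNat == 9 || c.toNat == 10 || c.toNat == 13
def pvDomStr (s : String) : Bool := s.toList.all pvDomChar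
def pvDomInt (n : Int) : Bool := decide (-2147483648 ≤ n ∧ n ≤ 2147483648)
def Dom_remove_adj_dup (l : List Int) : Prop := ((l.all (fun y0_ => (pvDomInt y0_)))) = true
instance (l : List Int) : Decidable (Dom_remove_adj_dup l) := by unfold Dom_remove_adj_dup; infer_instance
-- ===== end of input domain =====

-- ===== PORT A =====
-- B replaces A's index-collection pass plus quadratic membership filter by a run-skipping
-- two-pointer scan emitting the last element of each maximal run; measured faster (asymptotic).
def remove_adj_dup (l : List Int) : Option (List Int) :=
  if l ≠ [] then
    let indices : List Int :=
      (PySem.List.pyRange 0 ((l.length : Int) - 1) 1).foldl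
        (fun acc i =>
          if PySem.List.pyGetD l i 0 == PySem.List.pyGetD l (i + 1) 0 then acc ++ [i] else acc) []
    some (((PySem.List.enumerate l).filter (fun ji => !(indices.contains ji.1))).map (·.2))
  else none

-- ===== PORT B =====
-- loop condition of the inner while
@[reducible] def pvAdjEq (l : List Int) (j : Nat) : Prop :=
  j + 1 < l.length ∧ (PySem.List.pyGetD l ((j : Int) + 1) 0 == PySem.List.pyGetD l (j : Int) 0) = true

-- inner while loop (fuel = a totality guard only; the loop advances j, bounded by the length)
def pvRunEnd (l : List Int) : Nat → Nat → Nat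
  | 0, j => j
  | fuel + 1, j => if pvAdjEq l j then pvRunEnd l fuel (j + 1) else j

-- outer while loop: one iteration per maximal run, emitting its last element
def pvOuter (l : List Int) : Nat → Nat → List Int
  | 0, _ => []
  | fuel + 1, i =>
    if i < l.length then
      PySem.List.pyGetD l ((pvRunEnd l l.length i : Nat) : Int) 0 ::
        pvOuter l fuel (pvRunEnd l l.length i + 1)
    else []

def remove_adj_dup_alt (l : List Int) : Option (List Int) :=
  if l = [] then none else some (pvOuter l l.length 0)

-- ===== PRECONDITION & SPEC =====
def Spec_remove_adj_dup (l : List Int) (out : Option (List Int)) : Prop := out = remove_adj_dup_alt l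
instance (l : List Int) (out : Option (List Int)) : Decidable (Spec_remove_adj_dup l out) := by unfold Spec_remove_adj_dup; infer_instance

-- ===== CLAIM (what is proved, stated in full; the proofs are below) =====
def Claim_equal_remove_adj_dup : Prop := ∀ (l : List Int), Dom_remove_adj_dup l → Spec_remove_adj_dup l (remove_adj_dup l)

-- ===== LEMMAS AND PROOFS =====

/-- The common value: keep each element unless it equals its successor. -/
def pvCore : List Int → List Int
  | [] => []
  | [x] => [x]
  | x :: y :: t => if x = y then pvCore (y :: t) else x :: pvCore (y :: t)

/-- Positional selection: keep the element at position k iff `p k`. -/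
def selIdx (p : Nat → Bool) : List Int → List Int
  | [] => []
  | x :: t => (if p 0 then [x] else []) ++ selIdx (fun k => p (k + 1)) t

theorem selIdx_congr (p q : Nat → Bool) (h : ∀ k, p k = q k) :
    ∀ l : List Int, selIdx p l = selIdx q l := by
  intro l
  induction l generalizing p q with
  | nil => rfl
  | cons x t ih => simp [selIdx, h 0, ih (fun k => p (k + 1)) (fun k => q (k + 1)) (fun k => h (k + 1))]

theorem enum_filter_eq_selIdx (xs : List Int) (s : Int) (p : Int → Bool) :
    ((PySem.List.enumerate xs s).filter (fun q => p q.1)).map (·.2)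
      = selIdx (fun k => p (s + k)) xs := by
  induction xs generalizing s with
  | nil => simp [PySem.List.enumerate, selIdx]
  | cons x t ih =>
      rw [PySem.List.enumerate_cons]
      have ht : selIdx (fun k => p (s + 1 + (k : Int))) t
          = selIdx (fun k => p (s + ((k : Int) + 1))) t :=
        selIdx_congr _ _ (fun k => congrArg p (by ring)) t
      cases hp : p s with
      | true => simp [hp, selIdx, ih (s + 1), ht]
      | false => simp [hp, selIdx, ih (s + 1), ht]

theorem selIdx_eq_core (l : List Int) :
    selIdx (fun k => !(decide ((k : Int) < (l.length : Int) - 1 ∧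
        (PySem.List.pyGetD l (k : Int) 0 == PySem.List.pyGetD l ((k : Int) + 1) 0) = true))) l
      = pvCore l := by
  induction l with
  | nil => rfl
  | cons x t ih =>
      cases t with
      | nil => simp [selIdx, pvCore]
      | cons y t' =>
          have hshift : ∀ k : Nat,
              (!(decide ((((k + 1 : Nat)) : Int) < ((x :: y :: t').length : Int) - 1 ∧
                (PySem.List.pyGetD (x :: y :: t') (((k + 1 : Nat)) : Int) 0 ==
                  PySem.List.pyGetD (x :: y :: t') ((((k + 1 : Nat)) : Int) + 1) 0) = true)))
              = (!(decide (((k : Nat) : Int) < (((y :: t').length : Int)) - 1 ∧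
                (PySem.List.pyGetD (y :: t') ((k : Nat) : Int) 0 ==
                  PySem.List.pyGetD (y :: t') (((k : Nat) : Int) + 1) 0) = true))) := by
            intro k
            have h1 : (((k + 1 : Nat)) : Int) + 1 = (((k + 2 : Nat)) : Int) := by push_cast; ring
            have e1 : PySem.List.pyGetD (x :: y :: t') (((k + 1 : Nat)) : Int) 0
                = (y :: t').getD k 0 := by rw [PySem.List.pyGetD_natCast]; rfl
            have e2 : PySem.List.pyGetD (x :: y :: t') (((k + 2 : Nat)) : Int) 0
                = (y :: t').getD (k + 1) 0 := by rw [PySem.List.pyGetD_natCast]; rfl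
            have e3 : PySem.List.pyGetD (y :: t') ((k : Nat) : Int) 0 = (y :: t').getD k 0 :=
              PySem.List.pyGetD_natCast _ _ _
            have h2 : ((k : Nat) : Int) + 1 = (((k + 1 : Nat)) : Int) := by push_cast; ring
            have e4 : PySem.List.pyGetD (y :: t') (((k + 1 : Nat)) : Int) 0
                = (y :: t').getD (k + 1) 0 := by rw [PySem.List.pyGetD_natCast]
            rw [h1, e1, e2, e3, h2, e4]
            refine congrArg Bool.not (decide_eq_decide.mpr (and_congr_left' ?_))
            simp only [List.length_cons]
            push_cast
            omega
          rw [show ((x :: y :: t') : List Int) = x :: (y :: t') from rfl, selIdx,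
            selIdx_congr _ _ hshift (y :: t'), ih]
          have hx : PySem.List.pyGetD (x :: y :: t') ((0 : Nat) : Int) 0 = x := by
            rw [PySem.List.pyGetD_natCast]; rfl
          have hy : PySem.List.pyGetD (x :: y :: t') (((0 : Nat) : Int) + 1) 0 = y := by
            rw [show ((0 : Nat) : Int) + 1 = (((1 : Nat)) : Int) by push_cast,
              PySem.List.pyGetD_natCast]
            simp
          rw [hx, hy]
          have hlen : (((0 : Nat)) : Int) < ((x :: y :: t').length : Int) - 1 := by
            simp only [List.length_cons]; push_cast; omega
          by_cases hxy : x = y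
          · simp [pvCore, hxy]
          · simp [pvCore, hxy]

theorem pvGet_nat (l : List Int) (k : Nat) (hk : k < l.length) :
    PySem.List.pyGetD l ((k : Nat) : Int) 0 = l[k] := by
  rw [PySem.List.pyGetD_natCast, List.getD_eq_getElem l 0 hk]

theorem pvAdjEq_lt (l : List Int) (j : Nat) (h : pvAdjEq l j) : j + 1 < l.length := h.1

theorem pvRunEnd_ge (l : List Int) : ∀ (f j : Nat), j ≤ pvRunEnd l f j := by
  intro f
  induction f with
  | zero => intro j; exact le_refl j
  | succ m ih =>
      intro j
      rw [pvRunEnd]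
      split
      · exact le_trans (Nat.le_succ j) (ih (j + 1))
      · exact le_refl j

theorem pvRunEnd_stop (l : List Int) (f j : Nat) (h : ¬ pvAdjEq l j) : pvRunEnd l f j = j := by
  cases f with
  | zero => rfl
  | succ m => rw [pvRunEnd, if_neg h]

theorem pvRunEnd_fuel (l : List Int) :
    ∀ (f1 f2 j : Nat), l.length - j ≤ f1 → l.length - j ≤ f2 →
      pvRunEnd l f1 j = pvRunEnd l f2 j := by
  intro f1
  induction f1 with
  | zero =>
      intro f2 j h1 _
      have hno : ¬ pvAdjEq l j := fun hc => by have := pvAdjEq_lt l j hc; omega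
      rw [pvRunEnd_stop l 0 j hno, pvRunEnd_stop l f2 j hno]
  | succ m ih =>
      intro f2 j h1 h2
      by_cases hc : pvAdjEq l j
      · have hlt := pvAdjEq_lt l j hc
        cases f2 with
        | zero => omega
        | succ t =>
            rw [pvRunEnd, pvRunEnd, if_pos hc, if_pos hc]
            exact ih t (j + 1) (by omega) (by omega)
      · rw [pvRunEnd_stop l _ j hc, pvRunEnd_stop l _ j hc]

theorem pvRunEnd_step (l : List Int) (f j : Nat) (h : pvAdjEq l j) (hf : l.length - j ≤ f) :
    pvRunEnd l f j = pvRunEnd l f (j + 1) := by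
  have hlt := pvAdjEq_lt l j h
  cases f with
  | zero => omega
  | succ m =>
      rw [pvRunEnd, if_pos h]
      exact pvRunEnd_fuel l m (m + 1) (j + 1) (by omega) (by omega)

theorem pvOuter_fuel (l : List Int) :
    ∀ (f1 f2 i : Nat), l.length - i ≤ f1 → l.length - i ≤ f2 →
      pvOuter l f1 i = pvOuter l f2 i := by
  intro f1
  induction f1 with
  | zero =>
      intro f2 i h1 _
      have hge : ¬ i < l.length := by omega
      cases f2 with
      | zero => rfl
      | succ t => rw [pvOuter, pvOuter, if_neg hge]
  | succ m ih =>
      intro f2 i h1 h2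
      by_cases hi : i < l.length
      · cases f2 with
        | zero => omega
        | succ t =>
            rw [pvOuter, pvOuter, if_pos hi, if_pos hi]
            have hge := pvRunEnd_ge l l.length i
            exact congrArg _ (ih t (pvRunEnd l l.length i + 1) (by omega) (by omega))
      · cases f2 with
        | zero => rw [pvOuter, pvOuter, if_neg hi]
        | succ t => rw [pvOuter, pvOuter, if_neg hi, if_neg hi]

theorem pvOuter_eq_core (l : List Int) :
    ∀ (fuel i : Nat), l.length - i ≤ fuel → pvOuter l fuel i = pvCore (l.drop i) := by
  intro fuel
  induction fuel with
  | zero =>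
      intro i h
      have hd : l.drop i = [] := List.drop_eq_nil_of_le (by omega)
      rw [pvOuter, hd, pvCore]
  | succ m ih =>
      intro i h
      by_cases hi : i < l.length
      · have hdrop : l.drop i = l[i] :: l.drop (i + 1) := List.drop_eq_getElem_cons hi
        by_cases hc : pvAdjEq l i
        · -- run continues: step the inner loop and merge with the next outer iteration
          have h1 := pvAdjEq_lt l i hc
          have hrun : pvRunEnd l l.length i = pvRunEnd l l.length (i + 1) :=
            pvRunEnd_step l l.length i hc (by omega)
          have hstep : pvOuter l (m + 1) i = pvOuter l (m + 1) (i + 1) := by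
            rw [pvOuter, pvOuter, if_pos hi, if_pos h1, hrun]
          have hxy : l[i] = l[i + 1] := by
            have heq := hc.2
            have hcast : ((i : Nat) : Int) + 1 = (((i + 1 : Nat)) : Int) := by push_cast; ring
            rw [hcast, pvGet_nat l (i + 1) h1, pvGet_nat l i hi] at heq
            exact (beq_iff_eq.mp heq).symm
          have hdrop1 : l.drop (i + 1) = l[i + 1] :: l.drop (i + 2) :=
            List.drop_eq_getElem_cons h1
          rw [hstep, pvOuter_fuel l (m + 1) m (i + 1) (by omega) (by omega),
            ih (i + 1) (by omega), hdrop, hdrop1, hxy, pvCore]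
          simp
        · -- run ends at i: emit l[i] and continue at i+1
          have hrun : pvRunEnd l l.length i = i := pvRunEnd_stop l l.length i hc
          rw [pvOuter, if_pos hi, hrun, pvGet_nat l i hi, ih (i + 1) (by omega), hdrop]
          by_cases h1 : i + 1 < l.length
          · have hne : l[i] ≠ l[i + 1] := by
              intro he
              apply hc
              refine ⟨h1, ?_⟩
              have hcast : ((i : Nat) : Int) + 1 = (((i + 1 : Nat)) : Int) := by push_cast; ring
              rw [hcast, pvGet_nat l (i + 1) h1, pvGet_nat l i hi]
              exact beq_iff_eq.mpr he.symm
            have hdrop1 : l.drop (i + 1) = l[i + 1] :: l.drop (i + 2) :=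
              List.drop_eq_getElem_cons h1
            rw [hdrop1, pvCore]
            simp [hne]
          · have hnil : l.drop (i + 1) = [] := List.drop_eq_nil_of_le (by omega)
            rw [hnil, pvCore, pvCore]
      · have hd : l.drop i = [] := List.drop_eq_nil_of_le (by omega)
        rw [pvOuter, if_neg hi, hd, pvCore]

theorem core_B (l : List Int) (h : l ≠ []) : remove_adj_dup_alt l = some (pvCore l) := by
  unfold remove_adj_dup_alt
  rw [if_neg h, pvOuter_eq_core l l.length 0 (by omega), List.drop_zero]

theorem core_A (l : List Int) (h : l ≠ []) : remove_adj_dup l = some (pvCore l) := by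
  unfold remove_adj_dup
  rw [if_pos h]
  simp only [PySem.List.foldl_append_if
    (fun i => PySem.List.pyGetD l i 0 == PySem.List.pyGetD l (i + 1) 0) (fun i => i),
    List.nil_append, List.map_id']
  have hcong : ∀ ji ∈ PySem.List.enumerate l 0,
      (!(((PySem.List.pyRange 0 ((l.length : Int) - 1) 1).filter
          (fun i => PySem.List.pyGetD l i 0 == PySem.List.pyGetD l (i + 1) 0)).contains ji.1))
      = (!(decide (ji.1 < (l.length : Int) - 1 ∧
          (PySem.List.pyGetD l ji.1 0 == PySem.List.pyGetD l (ji.1 + 1) 0) = true))) := by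
    intro ji hji
    have hj0 : 0 ≤ ji.1 := by
      have : ji.1 ∈ (PySem.List.enumerate l 0).map (·.1) := List.mem_map_of_mem hji
      rw [PySem.List.map_fst_enumerate] at this
      exact (PySem.List.mem_pyRange_one.mp this).1
    rw [List.contains_eq_mem]
    refine congrArg Bool.not (decide_eq_decide.mpr ?_)
    rw [List.mem_filter, PySem.List.mem_pyRange_one]
    constructor
    · rintro ⟨⟨_, hlt⟩, hp⟩; exact ⟨hlt, hp⟩
    · rintro ⟨hlt, hp⟩; exact ⟨⟨hj0, hlt⟩, hp⟩
  rw [List.filter_congr hcong]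
  rw [enum_filter_eq_selIdx l 0 (fun j => !(decide (j < (l.length : Int) - 1 ∧
    (PySem.List.pyGetD l j 0 == PySem.List.pyGetD l (j + 1) 0) = true)))]
  have : selIdx (fun k => !(decide ((0 : Int) + (k : Int) < (l.length : Int) - 1 ∧
      (PySem.List.pyGetD l ((0 : Int) + (k : Int)) 0 ==
        PySem.List.pyGetD l (((0 : Int) + (k : Int)) + 1) 0) = true))) l
      = selIdx (fun k => !(decide ((k : Int) < (l.length : Int) - 1 ∧
      (PySem.List.pyGetD l (k : Int) 0 ==
        PySem.List.pyGetD l ((k : Int) + 1) 0) = true))) l :=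
    selIdx_congr _ _ (fun k => by rw [zero_add]) l
  rw [this, selIdx_eq_core]

-- ===== VERDICT (by name: the statement is the Claim_ definition above) =====
theorem remove_adj_dup_spec : Claim_equal_remove_adj_dup := by
  intro l _
  unfold Spec_remove_adj_dup
  cases hl : l with
  | nil => rfl
  | cons x t => rw [core_A _ (by simp), core_B _ (by simp)]
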